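-- pv_equiv track=rewrite | github.com/daffapadantya12/Guard-Simple | guards.py | _categorize_toxicity
-- ===== SOURCE A (Python) =====
-- def _categorize_toxicity(prompt: str, is_indonesian: bool) -> str:
--     """Categorize toxicity type using content analysis"""
--     prompt_lower = prompt.lower()
--
--     if is_indonesian:
--         if any(word in prompt_lower for word in ['kekerasan', 'bunuh', 'mati', 'ancaman']):
--             return 'Violence'
--         elif any(word in prompt_lower for word in ['benci', 'sara', 'diskriminasi', 'anjing', 'babi']):
--             return 'Hate'
--         elif any(word in prompt_lower for word in ['seks', 'porno', 'telanjang']):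
--             return 'Sexual_Content'
--         elif any(word in prompt_lower for word in ['anak', 'bocah', 'remaja']):
--             return 'Sexual_Minors'
--     else:
--         if any(word in prompt_lower for word in ['violence', 'kill', 'murder', 'threat']):
--             return 'Violence'
--         elif any(word in prompt_lower for word in ['hate', 'racist', 'discrimination']):
--             return 'Hate'
--         elif any(word in prompt_lower for word in ['sex', 'porn', 'naked']):
--             return 'Sexual_Content'
--         elif any(word in prompt_lower for word in ['child', 'minor', 'kid']):
--             return 'Sexual_Minors'
--
--     return 'high_toxicity'  # Default toxicity category
-- ===== SOURCE B (Python) =====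
-- _LABELS = ('Violence', 'Hate', 'Sexual_Content', 'Sexual_Minors')
--
-- _RANKS = {
--     True: {
--         'kekerasan': 0, 'bunuh': 0, 'mati': 0, 'ancaman': 0,
--         'benci': 1, 'sara': 1, 'diskriminasi': 1, 'anjing': 1, 'babi': 1,
--         'seks': 2, 'porno': 2, 'telanjang': 2,
--         'anak': 3, 'bocah': 3, 'remaja': 3,
--     },
--     False: {
--         'violence': 0, 'kill': 0, 'murder': 0, 'threat': 0,
--         'hate': 1, 'racist': 1, 'discrimination': 1,
--         'sex': 2, 'porn': 2, 'naked': 2,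
--         'child': 3, 'minor': 3, 'kid': 3,
--     },
-- }
--
--
-- def _categorize_toxicity(prompt: str, is_indonesian: bool) -> str:
--     prompt_lower = prompt.lower()
--     hits = [rank for word, rank in _RANKS[bool(is_indonesian)].items()
--             if word in prompt_lower]
--     return _LABELS[min(hits)] if hits else 'high_toxicity'
-- ===== Notes on version B (the rewrite author's own statement) =====
-- stated objective: alternative
-- what changed: Replaced the ordered if/elif cascade of early returns by a flat keyword-to-priority-rank map: one pass collects the ranks of all matching keywords, and the label of the minimum rank is returned (min-aggregation instead of first-match short-circuit).
import Mathlib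
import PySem

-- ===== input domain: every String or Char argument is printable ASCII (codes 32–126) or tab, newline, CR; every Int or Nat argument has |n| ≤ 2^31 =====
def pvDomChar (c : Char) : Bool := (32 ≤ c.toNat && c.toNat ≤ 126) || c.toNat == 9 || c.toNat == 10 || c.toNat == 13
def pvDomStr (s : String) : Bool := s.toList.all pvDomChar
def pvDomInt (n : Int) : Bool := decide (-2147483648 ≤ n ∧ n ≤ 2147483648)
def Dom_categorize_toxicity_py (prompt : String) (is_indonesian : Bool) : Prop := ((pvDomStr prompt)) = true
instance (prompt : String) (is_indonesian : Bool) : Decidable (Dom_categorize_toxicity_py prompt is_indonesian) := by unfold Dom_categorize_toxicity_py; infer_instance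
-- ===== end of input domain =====

-- B replaces A's ordered if/elif cascade by a flat keyword→priority-rank map: one pass
-- collects the ranks of ALL matching keywords and the label of the MINIMUM rank is
-- returned (min-aggregation instead of first-match early exit); objective: alternative.

-- ===== PORT A =====
-- Literal transliteration of A's nested if/elif cascade.
def categorize_toxicity_py (prompt : String) (is_indonesian : Bool) : String :=
  let prompt_lower := PySem.Str.lower prompt
  if is_indonesian then
    if ["kekerasan", "bunuh", "mati", "ancaman"].any (fun w => PySem.Str.isIn w prompt_lower) then
      "Violence"
    else if ["benci", "sara", "diskriminasi", "anjing", "babi"].any (fun w => PySem.Str.isIn w prompt_lower) then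
      "Hate"
    else if ["seks", "porno", "telanjang"].any (fun w => PySem.Str.isIn w prompt_lower) then
      "Sexual_Content"
    else if ["anak", "bocah", "remaja"].any (fun w => PySem.Str.isIn w prompt_lower) then
      "Sexual_Minors"
    else
      "high_toxicity"
  else
    if ["violence", "kill", "murder", "threat"].any (fun w => PySem.Str.isIn w prompt_lower) then
      "Violence"
    else if ["hate", "racist", "discrimination"].any (fun w => PySem.Str.isIn w prompt_lower) then
      "Hate"
    else if ["sex", "porn", "naked"].any (fun w => PySem.Str.isIn w prompt_lower) then
      "Sexual_Content"
    else if ["child", "minor", "kid"].any (fun w => PySem.Str.isIn w prompt_lower) then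
      "Sexual_Minors"
    else
      "high_toxicity"

-- ===== PORT B =====
-- _LABELS: tuple of labels indexed by priority rank
def pvLabels : List String := ["Violence", "Hate", "Sexual_Content", "Sexual_Minors"]

-- _RANKS: dict {True: {word: rank}, False: {word: rank}}
def pvRanks : PySem.Dict Bool (PySem.Dict String Int) :=
  PySem.Dict.ofList
  [ (true, PySem.Dict.ofList
      [ ("kekerasan", 0), ("bunuh", 0), ("mati", 0), ("ancaman", 0),
        ("benci", 1), ("sara", 1), ("diskriminasi", 1), ("anjing", 1), ("babi", 1),
        ("seks", 2), ("porno", 2), ("telanjang", 2),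
        ("anak", 3), ("bocah", 3), ("remaja", 3) ]),
    (false, PySem.Dict.ofList
      [ ("violence", 0), ("kill", 0), ("murder", 0), ("threat", 0),
        ("hate", 1), ("racist", 1), ("discrimination", 1),
        ("sex", 2), ("porn", 2), ("naked", 2),
        ("child", 3), ("minor", 3), ("kid", 3) ]) ]

-- the list comprehension: [rank for word, rank in items if word in prompt_lower]
def pvHits (prompt_lower : String) (items : List (String × Int)) : List Int :=
  items.filterMap (fun wr => if PySem.Str.isIn wr.1 prompt_lower then some wr.2 else none)

-- return _LABELS[min(hits)] if hits else 'high_toxicity'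
def categorize_toxicity_py_alt (prompt : String) (is_indonesian : Bool) : String :=
  let prompt_lower := PySem.Str.lower prompt
  let hits := pvHits prompt_lower (PySem.Dict.getD pvRanks is_indonesian PySem.Dict.empty).items
  if hits.isEmpty then "high_toxicity"
  else ((PySem.List.min? hits (fun x => x)).bind
          (fun m => PySem.List.pyGet? pvLabels m)).getD "high_toxicity"
  -- the .getD only makes the list indexing total; min(hits) is always a valid index

-- ===== PRECONDITION & SPEC =====
def Spec_categorize_toxicity_py (prompt : String) (is_indonesian : Bool) (out : String) : Prop := out = categorize_toxicity_py_alt prompt is_indonesian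
instance (prompt : String) (is_indonesian : Bool) (out : String) : Decidable (Spec_categorize_toxicity_py prompt is_indonesian out) := by unfold Spec_categorize_toxicity_py; infer_instance

-- ===== CLAIM =====
def Claim_equal_categorize_toxicity_py : Prop := ∀ (prompt : String) (is_indonesian : Bool), Dom_categorize_toxicity_py prompt is_indonesian → Spec_categorize_toxicity_py prompt is_indonesian (categorize_toxicity_py prompt is_indonesian)

-- ===== LEMMAS AND PROOFS =====

-- proof-side view: A's cascade as a list of (keyword group, label) in priority order
def pvGroups : Bool → List (List String × String)
  | true =>
    [ (["kekerasan", "bunuh", "mati", "ancaman"], "Violence"),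
      (["benci", "sara", "diskriminasi", "anjing", "babi"], "Hate"),
      (["seks", "porno", "telanjang"], "Sexual_Content"),
      (["anak", "bocah", "remaja"], "Sexual_Minors") ]
  | false =>
    [ (["violence", "kill", "murder", "threat"], "Violence"),
      (["hate", "racist", "discrimination"], "Hate"),
      (["sex", "porn", "naked"], "Sexual_Content"),
      (["child", "minor", "kid"], "Sexual_Minors") ]

def pvCascade (p : String) : List (List String × String) → String
  | [] => "high_toxicity"
  | (ws, l) :: rest =>
    if ws.any (fun w => PySem.Str.isIn w p) then l else pvCascade p rest

-- flatten the groups to a (word, rank) table, ranks starting at k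
def pvFlat (k : Int) : List (List String × String) → List (String × Int)
  | [] => []
  | (ws, _) :: rest => ws.map (fun w => (w, k)) ++ pvFlat (k + 1) rest

theorem pvFlat_rank_ge (G : List (List String × String)) :
    ∀ (k : Int), ∀ wr ∈ pvFlat k G, k ≤ wr.2 := by
  induction G with
  | nil => intro k wr h; simp [pvFlat] at h
  | cons g rest ih =>
    intro k wr h
    obtain ⟨ws, l⟩ := g
    simp only [pvFlat, List.mem_append, List.mem_map] at h
    rcases h with ⟨w, _, rfl⟩ | h
    · exact le_refl k
    · have := ih (k + 1) wr h; omega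

theorem pvHits_rank_ge (p : String) (G : List (List String × String)) (k : Int) :
    ∀ x ∈ pvHits p (pvFlat k G), k ≤ x := by
  intro x hx
  simp only [pvHits, List.mem_filterMap, Option.ite_none_right_eq_some,
    Option.some.injEq] at hx
  obtain ⟨wr, hmem, -, rfl⟩ := hx
  exact pvFlat_rank_ge G k wr hmem

theorem pvMin_eq (l : List Int) (r : Int) (h1 : r ∈ l) (h2 : ∀ x ∈ l, r ≤ x) :
    PySem.List.min? l (fun x => x) = some r := by
  cases hm : PySem.List.min? l (fun x => x) with
  | none =>
    rw [PySem.List.min?_eq_none_iff] at hm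
    subst hm; simp at h1
  | some m =>
    have hmem : m ∈ l := PySem.List.min?_mem hm
    have hmin := PySem.List.min?_isMin hm r h1
    have := h2 m hmem
    congr 1; omega

-- the generic equivalence: min-rank over the flattened table = first-match cascade
theorem pvMain (p : String) (G : List (List String × String)) :
    ∀ (k : Int),
    (∀ (i : Nat) (hi : i < G.length),
        PySem.List.pyGet? pvLabels (k + (i : Int)) = some (G[i].2)) →
    (if (pvHits p (pvFlat k G)).isEmpty then "high_toxicity"
     else ((PySem.List.min? (pvHits p (pvFlat k G)) (fun x => x)).bind
             (fun m => PySem.List.pyGet? pvLabels m)).getD "high_toxicity")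
    = pvCascade p G := by
  induction G with
  | nil => intro k _; simp [pvFlat, pvHits, pvCascade]
  | cons g rest ih =>
    intro k hlab
    obtain ⟨ws, l⟩ := g
    by_cases hg : ws.any (fun w => PySem.Str.isIn w p)
    · -- the head group matches: min rank is k, label is l
      rw [List.any_eq_true] at hg
      obtain ⟨w, hw, hwin⟩ := hg
      have hwin' : PySem.Chars.isIn w.toList p.toList = true := by simpa using hwin
      have hkmem : (k : Int) ∈ pvHits p (pvFlat k ((ws, l) :: rest)) := by
        simp only [pvHits, List.mem_filterMap]
        refine ⟨(w, k), ?_, by simp [hwin']⟩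
        simp only [pvFlat, List.mem_append, List.mem_map]
        exact Or.inl ⟨w, hw, rfl⟩
      have hge := pvHits_rank_ge p ((ws, l) :: rest) k
      have hmin := pvMin_eq _ k hkmem hge
      have hne : (pvHits p (pvFlat k ((ws, l) :: rest))).isEmpty = false := by
        rcases hh : pvHits p (pvFlat k ((ws, l) :: rest)) with _ | _
        · rw [hh] at hkmem; simp at hkmem
        · simp
      rw [hne, hmin]
      have h0 := hlab 0 (by simp)
      simp only [Int.natCast_zero, add_zero] at h0
      simp only [Option.bind_some, h0]
      have : pvCascade p ((ws, l) :: rest) = l := by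
        simp only [pvCascade]
        rw [if_pos (List.any_eq_true.mpr ⟨w, hw, hwin⟩)]
      rw [this]
      rfl
    · -- the head group does not match: its words contribute nothing
      have hnone : pvHits p (ws.map (fun w => (w, k))) = [] := by
        rw [Bool.not_eq_true, List.any_eq_false] at hg
        simp only [pvHits, List.filterMap_eq_nil_iff, List.mem_map]
        rintro wr ⟨w, hw, rfl⟩
        have hfw := hg w hw
        simp at hfw
        simp [hfw]
      have hsplit : pvHits p (pvFlat k ((ws, l) :: rest))
          = pvHits p (pvFlat (k + 1) rest) := by
        simp only [pvFlat, pvHits, List.filterMap_append]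
        rw [show (ws.map (fun w => (w, k))).filterMap
              (fun wr => if PySem.Str.isIn wr.1 p then some wr.2 else none)
            = pvHits p (ws.map (fun w => (w, k))) from rfl, hnone]
        rfl
      have hlab' : ∀ (i : Nat) (hi : i < rest.length),
          PySem.List.pyGet? pvLabels ((k + 1) + (i : Int)) = some (rest[i].2) := by
        intro i hi
        have := hlab (i + 1) (by simpa using Nat.succ_lt_succ hi)
        simpa [add_comm, add_left_comm, add_assoc] using this
      rw [hsplit, ih (k + 1) hlab']
      simp only [pvCascade]
      rw [if_neg hg]

-- ===== VERDICT =====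
theorem categorize_toxicity_py_spec : Claim_equal_categorize_toxicity_py := by
  intro prompt is_indonesian _
  unfold Spec_categorize_toxicity_py
  have hlabT : ∀ (i : Nat) (hi : i < (pvGroups true).length),
      PySem.List.pyGet? pvLabels ((0 : Int) + (i : Int)) = some ((pvGroups true)[i].2) := by
    intro i hi
    simp only [pvGroups, List.length_cons, List.length_nil] at hi
    interval_cases i <;> rfl
  have hlabF : ∀ (i : Nat) (hi : i < (pvGroups false).length),
      PySem.List.pyGet? pvLabels ((0 : Int) + (i : Int)) = some ((pvGroups false)[i].2) := by
    intro i hi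
    simp only [pvGroups, List.length_cons, List.length_nil] at hi
    interval_cases i <;> rfl
  cases is_indonesian
  · have hA : categorize_toxicity_py prompt false
        = pvCascade (PySem.Str.lower prompt) (pvGroups false) := by
      simp only [categorize_toxicity_py, pvCascade, pvGroups, Bool.false_eq_true, if_false]
    have hB : categorize_toxicity_py_alt prompt false
        = (if (pvHits (PySem.Str.lower prompt) (pvFlat 0 (pvGroups false))).isEmpty
           then "high_toxicity"
           else ((PySem.List.min? (pvHits (PySem.Str.lower prompt)
                    (pvFlat 0 (pvGroups false))) (fun x => x)).bind
                   (fun m => PySem.List.pyGet? pvLabels m)).getD "high_toxicity") := by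
      have e : (PySem.Dict.getD pvRanks false PySem.Dict.empty).items
          = pvFlat 0 (pvGroups false) := by rfl
      simp only [categorize_toxicity_py_alt, e]
    rw [hA, hB, pvMain (PySem.Str.lower prompt) (pvGroups false) 0 hlabF]
  · have hA : categorize_toxicity_py prompt true
        = pvCascade (PySem.Str.lower prompt) (pvGroups true) := by
      simp only [categorize_toxicity_py, pvCascade, pvGroups, if_true]
    have hB : categorize_toxicity_py_alt prompt true
        = (if (pvHits (PySem.Str.lower prompt) (pvFlat 0 (pvGroups true))).isEmpty
           then "high_toxicity"
           else ((PySem.List.min? (pvHits (PySem.Str.lower prompt)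
                    (pvFlat 0 (pvGroups true))) (fun x => x)).bind
                   (fun m => PySem.List.pyGet? pvLabels m)).getD "high_toxicity") := by
      have e : (PySem.Dict.getD pvRanks true PySem.Dict.empty).items
          = pvFlat 0 (pvGroups true) := by rfl
      simp only [categorize_toxicity_py_alt, e]
    rw [hA, hB, pvMain (PySem.Str.lower prompt) (pvGroups true) 0 hlabT]
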